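-- pv_equiv track=rewrite | github.com/ashengaout/Qualcomm-Procesor-Design | Hardware/Kmap.py | prod_term_from_group
-- ===== SOURCE A (Python) =====
-- from itertools import combinations
--
-- def prod_term_from_group(group: list[int], var_names: list[str]) -> str:
--     n = len(var_names)
--     xor_mask = 0
--     for a, b in combinations(group, 2):
--         xor_mask |= (a ^ b)
--
--     base = group[0]
--     term_parts = []
--     for i, var in enumerate(var_names):
--         bit_pos = n - 1 - i
--         if (xor_mask >> bit_pos) & 1:
--             continue  # variable eliminated
--         term_parts.append(var if (base >> bit_pos) & 1 else f"{var}'")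
--
--     return "".join(term_parts) if term_parts else "1"
-- ===== SOURCE B (Python) =====
-- def prod_term_from_group(group: list[int], var_names: list[str]) -> str:
--     base = group[0]
--     mask = 0
--     for x in group:
--         mask |= x ^ base
--     n = len(var_names)
--     parts = [v if (base >> b) & 1 else v + "'"
--              for v, b in zip(var_names, reversed(range(n)))
--              if not (mask >> b) & 1]
--     return "".join(parts) if parts else "1"
-- ===== Notes on version B (the rewrite author's own statement) =====
-- stated objective: faster
-- what changed: The xor-mask is computed in one pass by OR-ing x XOR group[0] over the elements instead of OR-ing a XOR b over all O(k^2) pairs from combinations(group, 2), and the term is built as a single comprehension over var_names zipped with descending bit positions instead of an index-arithmetic loop.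
import Mathlib
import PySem

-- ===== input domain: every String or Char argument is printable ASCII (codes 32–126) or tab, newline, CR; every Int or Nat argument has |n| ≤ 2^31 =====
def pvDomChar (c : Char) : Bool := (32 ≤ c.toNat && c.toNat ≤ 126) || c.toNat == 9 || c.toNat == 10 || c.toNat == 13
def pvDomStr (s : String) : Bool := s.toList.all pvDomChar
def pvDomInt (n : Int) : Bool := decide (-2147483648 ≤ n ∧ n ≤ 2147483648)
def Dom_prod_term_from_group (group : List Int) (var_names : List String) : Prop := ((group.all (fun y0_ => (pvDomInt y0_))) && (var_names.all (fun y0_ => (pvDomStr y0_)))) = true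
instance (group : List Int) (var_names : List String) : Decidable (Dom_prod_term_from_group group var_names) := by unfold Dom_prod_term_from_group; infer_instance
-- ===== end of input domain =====

-- ===== PORT A =====
-- B computes the xor-mask in one O(k) pass (x XOR group[0]) instead of A's O(k^2) pass over all pairs; objective: faster.

-- 'for a, b in combinations(group, 2): xor_mask |= a ^ b'
def pvCombOr : List Int → Int → Int
  | [], m => m
  | x :: rest, m =>
      pvCombOr rest (rest.foldl (fun acc y => PySem.Int.bor acc (PySem.Int.bxor x y)) m)

-- 'for i, var in enumerate(var_names): …' (i counts from 0; i + vs.length = n at every call, so the Nat subtraction in n-1-i is exact)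
def pvTermLoop (base xm : Int) (n : Nat) : Nat → List String → List (List Char)
  | _, [] => []
  | i, v :: vs =>
      let bitPos := n - 1 - i
      if PySem.Int.band (xm >>> bitPos) 1 != 0 then
        pvTermLoop base xm n (i+1) vs
      else
        (if PySem.Int.band (base >>> bitPos) 1 != 0 then v.toList else v.toList ++ ['\'']) ::
          pvTermLoop base xm n (i+1) vs

def prod_term_from_group (group : List Int) (var_names : List String) : String :=
  let n := var_names.length
  let xor_mask := pvCombOr group 0
  match group with
  | [] => ""          -- Python raises IndexError on group[0]; excluded by Pre_
  | base :: _ =>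
      let term_parts := pvTermLoop base xor_mask n 0 var_names
      -- '"".join(term_parts)': joining with the empty separator is concatenation (ported by hand; exact)
      if term_parts.isEmpty then "1" else String.ofList term_parts.flatten

-- ===== PORT B =====
def prod_term_from_group_alt (group : List Int) (var_names : List String) : String :=
  match group with
  | [] => ""          -- Python raises IndexError on group[0]; excluded by Pre_
  | base :: _ =>
      -- 'for x in group: mask |= x ^ base'
      let mask := group.foldl (fun m x => PySem.Int.bor m (PySem.Int.bxor x base)) 0
      let n := var_names.length
      -- list comprehension over zip(var_names, reversed(range(n))) (bit positions are the Nat values n-1 … 0)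
      let parts :=
        ((var_names.zip ((List.range n).reverse)).filter
            (fun p => !(PySem.Int.band (mask >>> p.2) 1 != 0))).map
          (fun p => if PySem.Int.band (base >>> p.2) 1 != 0 then p.1.toList
                    else p.1.toList ++ ['\''])
      if parts.isEmpty then "1" else String.ofList parts.flatten

-- ===== PRECONDITION & SPEC =====
-- Pre_ excludes only the empty group, on which Python's group[0] raises IndexError in both A and B.
def Pre_prod_term_from_group (group : List Int) (var_names : List String) : Prop := group ≠ []
instance (group : List Int) (var_names : List String) : Decidable (Pre_prod_term_from_group group var_names) := by unfold Pre_prod_term_from_group; infer_instance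
def pvWitness_prod_term_from_group : List Int × List String := ([0, 1], ["a", "b"])
def Spec_prod_term_from_group (group : List Int) (var_names : List String) (out : String) : Prop := out = prod_term_from_group_alt group var_names
instance (group : List Int) (var_names : List String) (out : String) : Decidable (Spec_prod_term_from_group group var_names out) := by unfold Spec_prod_term_from_group; infer_instance

-- ===== CLAIM (what is proved, stated in full; the proofs are below) =====
def Claim_equal_prod_term_from_group : Prop := ∀ (group : List Int) (var_names : List String), Dom_prod_term_from_group group var_names → Pre_prod_term_from_group group var_names → Spec_prod_term_from_group group var_names (prod_term_from_group group var_names)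

-- ===== LEMMAS AND PROOFS =====

theorem pv_disj_add (a : Nat) : ∀ b : Nat, a &&& b = 0 → a + b = a ^^^ b := by
  induction a using Nat.div2Induction with
  | ind a ih =>
    intro b h
    rcases Nat.eq_zero_or_pos a with ha | ha
    · simp [ha]
    · have h2 : a / 2 &&& b / 2 = 0 := by
        rw [← Nat.and_div_two, h]
      have ih2 := ih ha (b / 2) h2
      have hx2 : (a ^^^ b) / 2 = a / 2 ^^^ b / 2 := Nat.xor_div_two
      have hb0 : (a &&& b).testBit 0 = false := by simp [h]
      rw [Nat.testBit_and] at hb0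
      have hm : (a ^^^ b) % 2 = a % 2 + b % 2 := by
        have t0 : (a ^^^ b).testBit 0 = (a.testBit 0 ^^ b.testBit 0) := Nat.testBit_xor ..
        simp only [Nat.testBit_zero] at t0 hb0
        rcases Nat.mod_two_eq_zero_or_one a with h1 | h1 <;>
          rcases Nat.mod_two_eq_zero_or_one b with h2 | h2 <;>
            simp [h1, h2] at t0 hb0 ⊢ <;> omega
      omega

theorem pv_sub_and_testBit (n m k : Nat) :
    (n - (n &&& m)).testBit k = (n.testBit k && !(m.testBit k)) := by
  have hd : (n ^^^ (n &&& m)).testBit k = (n.testBit k && !(m.testBit k)) := by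
    rw [Nat.testBit_xor, Nat.testBit_and]
    cases n.testBit k <;> cases m.testBit k <;> rfl
  have hdisj : (n ^^^ (n &&& m)) &&& (n &&& m) = 0 := by
    apply Nat.eq_of_testBit_eq
    intro i
    rw [Nat.testBit_and, Nat.testBit_xor, Nat.testBit_and, Nat.zero_testBit]
    cases n.testBit i <;> cases m.testBit i <;> rfl
  have hsum : (n ^^^ (n &&& m)) + (n &&& m) = n := by
    rw [pv_disj_add _ _ hdisj]
    apply Nat.eq_of_testBit_eq
    intro i
    rw [Nat.testBit_xor, Nat.testBit_xor, Nat.testBit_and]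
    cases n.testBit i <;> cases m.testBit i <;> rfl
  have : n - (n &&& m) = n ^^^ (n &&& m) := by omega
  rw [this, hd]

def pvIbit (a : Int) (k : Nat) : Bool :=
  if 0 ≤ a then a.toNat.testBit k else !((-a-1).toNat.testBit k)

theorem pvIbit_natCast (x : Nat) (k : Nat) : pvIbit (x : Int) k = x.testBit k := by
  simp [pvIbit]

theorem pvIbit_neg (x : Nat) (k : Nat) : pvIbit (-(x : Int) - 1) k = !(x.testBit k) := by
  simp only [pvIbit]
  rw [if_neg (by omega)]
  norm_num

theorem pv_ibit_bor (a b : Int) (k : Nat) :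
    pvIbit (PySem.Int.bor a b) k = (pvIbit a k || pvIbit b k) := by
  rcases a with m | m <;> rcases b with n | n <;>
    simp only [Int.ofNat_eq_natCast, Int.negSucc_eq, show ∀ x : Nat, -((x:Int)+1) = -(x:Int)-1 from fun x => by ring] <;>
    simp only [PySem.Int.bor] <;>
    [rw [if_pos (by omega), if_pos (by omega)];
     rw [if_pos (by omega), if_neg (by omega)];
     rw [if_neg (by omega), if_pos (by omega)];
     rw [if_neg (by omega), if_neg (by omega)]] <;>
    simp only [show ∀ x : Nat, (-(-((x:Int)) - 1) - 1).toNat = x from fun x => by omega,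
               Int.toNat_natCast] <;>
    simp only [pvIbit_natCast, pvIbit_neg]
  · rw [Nat.testBit_or]
  · rw [pv_sub_and_testBit]
    cases m.testBit k <;> cases n.testBit k <;> rfl
  · rw [pv_sub_and_testBit]
    cases m.testBit k <;> cases n.testBit k <;> rfl
  · rw [Nat.testBit_and]
    cases m.testBit k <;> cases n.testBit k <;> rfl

theorem pv_ibit_bxor (a b : Int) (k : Nat) :
    pvIbit (PySem.Int.bxor a b) k = (pvIbit a k != pvIbit b k) := by
  rcases a with m | m <;> rcases b with n | n <;>
    simp only [Int.ofNat_eq_natCast, Int.negSucc_eq, show ∀ x : Nat, -((x:Int)+1) = -(x:Int)-1 from fun x => by ring] <;>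
    simp only [PySem.Int.bxor] <;>
    [rw [if_pos (by omega), if_pos (by omega)];
     rw [if_pos (by omega), if_neg (by omega)];
     rw [if_neg (by omega), if_pos (by omega)];
     rw [if_neg (by omega), if_neg (by omega)]] <;>
    simp only [show ∀ x : Nat, (-(-((x:Int)) - 1) - 1).toNat = x from fun x => by omega,
               Int.toNat_natCast] <;>
    simp only [pvIbit_natCast, pvIbit_neg] <;>
    rw [Nat.testBit_xor] <;>
    cases m.testBit k <;> cases n.testBit k <;> rfl

theorem pv_test (m : Int) (k : Nat) :
    (PySem.Int.band (m >>> (k : Int)) 1 != 0) = pvIbit m k := by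
  rw [Int.shiftRight_natCast_right]
  rcases m with n | n
  · have hs : (Int.ofNat n) >>> k = ((n >>> k : Nat) : Int) := by
      simp [Int.ofNat_eq_natCast, Int.natCast_shiftRight]
    have ht : n.testBit k = ((n >>> k).testBit 0) := by
      rw [Nat.testBit_shiftRight, Nat.add_zero]
    rw [hs, show pvIbit (Int.ofNat n) k = n.testBit k from by
          simp [Int.ofNat_eq_natCast, pvIbit_natCast], ht]
    generalize n >>> k = q
    simp only [PySem.Int.band]
    rw [if_pos (Int.natCast_nonneg q), if_pos (by omega)]
    simp only [Int.toNat_natCast, Int.toNat_one]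
    rw [Nat.and_one_is_mod, Nat.testBit_zero]
    rcases Nat.mod_two_eq_zero_or_one q with h | h <;> simp [h]
  · have hs : (Int.negSucc n) >>> k = Int.negSucc (n >>> k) := Int.negSucc_shiftRight n k
    have ht : n.testBit k = ((n >>> k).testBit 0) := by
      rw [Nat.testBit_shiftRight, Nat.add_zero]
    have hp : pvIbit (Int.negSucc n) k = !((n >>> k).testBit 0) := by
      rw [show (Int.negSucc n) = -(n:Int) - 1 from by rw [Int.negSucc_eq]; ring,
          pvIbit_neg, ht]
    rw [hs, hp]
    generalize n >>> k = q
    rw [show Int.negSucc q = -(q:Int) - 1 from by rw [Int.negSucc_eq]; ring]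
    simp only [PySem.Int.band]
    rw [if_neg (by have := Int.natCast_nonneg q; omega), if_pos (by omega)]
    have e1 : (-(-((q:Nat):Int) - 1) - 1).toNat = q := by omega
    rw [e1]
    simp only [Int.toNat_one]
    rw [Nat.one_and_eq_mod_two, Nat.testBit_zero]
    rcases Nat.mod_two_eq_zero_or_one q with h | h <;> simp [h]


-- the inner 'for y in rest' of A's pair loop, seen at bit k
theorem pv_inner_fold (x : Int) (k : Nat) :
    ∀ (l : List Int) (m : Int),
      pvIbit (l.foldl (fun acc y => PySem.Int.bor acc (PySem.Int.bxor x y)) m) k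
        = (pvIbit m k || l.any (fun y => pvIbit y k != pvIbit x k)) := by
  intro l
  induction l with
  | nil => intro m; simp
  | cons y t ih =>
    intro m
    simp only [List.foldl_cons, List.any_cons]
    rw [ih, pv_ibit_bor, pv_ibit_bxor]
    cases pvIbit m k <;> cases pvIbit x k <;> cases pvIbit y k <;> simp

-- bit k of the OR over all pairs drawn from l
def pvPairAny (k : Nat) : List Int → Bool
  | [] => false
  | x :: rest => (rest.any (fun y => pvIbit y k != pvIbit x k) || pvPairAny k rest)

theorem pv_combOr_ibit (k : Nat) :
    ∀ (l : List Int) (m : Int),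
      pvIbit (pvCombOr l m) k = (pvIbit m k || pvPairAny k l) := by
  intro l
  induction l with
  | nil => intro m; simp [pvCombOr, pvPairAny]
  | cons x t ih =>
    intro m
    simp only [pvCombOr, pvPairAny]
    rw [ih, pv_inner_fold]
    cases pvIbit m k <;> simp

theorem pv_pairAny_head (k : Nat) :
    ∀ (l : List Int) (x : Int), pvPairAny k (x :: l) = l.any (fun y => pvIbit y k != pvIbit x k) := by
  intro l
  induction l with
  | nil => intro x; simp [pvPairAny]
  | cons y t ih =>
    intro x
    rw [show pvPairAny k (x :: y :: t)
          = ((y :: t).any (fun z => pvIbit z k != pvIbit x k) || pvPairAny k (y :: t)) from rfl,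
        ih y]
    by_cases h : pvIbit y k = pvIbit x k
    · have ht : t.any (fun z => pvIbit z k != pvIbit y k)
          = t.any (fun z => pvIbit z k != pvIbit x k) := by rw [h]
      rw [ht]
      simp only [List.any_cons]
      cases pvIbit y k <;> cases pvIbit x k <;> cases t.any (fun z => pvIbit z k != pvIbit x k) <;>
        simp_all
    · have hne : (pvIbit y k != pvIbit x k) = true := by
        cases hy : pvIbit y k <;> cases hx : pvIbit x k <;> simp_all
      simp [List.any_cons, hne]

-- B's single pass, seen at bit k
theorem pv_lineMask_ibit (base : Int) (k : Nat) :
    ∀ (l : List Int) (m : Int),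
      pvIbit (l.foldl (fun acc y => PySem.Int.bor acc (PySem.Int.bxor y base)) m) k
        = (pvIbit m k || l.any (fun y => pvIbit y k != pvIbit base k)) := by
  intro l
  induction l with
  | nil => intro m; simp
  | cons y t ih =>
    intro m
    simp only [List.foldl_cons, List.any_cons]
    rw [ih, pv_ibit_bor, pv_ibit_bxor]
    cases pvIbit m k <;> cases pvIbit base k <;> cases pvIbit y k <;> simp

-- A's pairwise mask and B's one-pass mask agree on every bit
theorem pv_mask_eq (base : Int) (rest : List Int) (k : Nat) :
    pvIbit (pvCombOr (base :: rest) 0) k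
      = pvIbit ((base :: rest).foldl (fun m x => PySem.Int.bor m (PySem.Int.bxor x base)) 0) k := by
  rw [pv_combOr_ibit, pv_pairAny_head, pv_lineMask_ibit]
  simp [pvIbit]

theorem pv_termLoop_eq (base xm : Int) :
    ∀ (vs : List String) (i n : Nat), i + vs.length = n →
      pvTermLoop base xm n i vs
        = ((vs.zip ((List.range vs.length).reverse)).filter
              (fun p => !(PySem.Int.band (xm >>> p.2) 1 != 0))).map
            (fun p => if PySem.Int.band (base >>> p.2) 1 != 0 then p.1.toList
                      else p.1.toList ++ ['\'']) := by
  intro vs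
  induction vs with
  | nil => intro i n h; simp [pvTermLoop]
  | cons v t ih =>
    intro i n h
    have hrange : (List.range (t.length + 1)).reverse = t.length :: (List.range t.length).reverse := by
      rw [List.range_succ, List.reverse_append]
      rfl
    have hb : n - 1 - i = t.length := by simp at h; omega
    simp only [List.length_cons, hrange, List.zip_cons_cons, List.filter_cons]
    simp only [pvTermLoop, hb]
    simp only [← Int.shiftRight_natCast_right]
    by_cases h0 : PySem.Int.band (xm >>> (t.length : Int)) 1 = 0 <;>
      simp [h0, ih (i + 1) n (by simp at h ⊢; omega)]

-- ===== VERDICT (by name: the statement is the Claim_ definition above) =====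
theorem prod_term_from_group_spec : Claim_equal_prod_term_from_group := by
  unfold Claim_equal_prod_term_from_group
  intro group var_names _ hpre
  unfold Spec_prod_term_from_group
  rcases group with _ | ⟨base, rest⟩
  · exact absurd rfl hpre
  · simp only [prod_term_from_group, prod_term_from_group_alt]
    rw [pv_termLoop_eq base (pvCombOr (base :: rest) 0) var_names 0 var_names.length (by omega)]
    have hmask : (fun p : String × Nat =>
          !(PySem.Int.band (pvCombOr (base :: rest) 0 >>> (p.2 : Int)) 1 != 0))
        = (fun p : String × Nat =>
          !(PySem.Int.band
              (((base :: rest).foldl (fun m x => PySem.Int.bor m (PySem.Int.bxor x base)) 0) >>> (p.2 : Int))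
              1 != 0)) := by
      funext p
      rw [pv_test, pv_test, pv_mask_eq]
    rw [hmask]
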